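-- pv_equiv track=rewrite | github.com/RajeetMavi/localrepo | something.py | find_heavy
-- ===== SOURCE A (Python) =====
-- def Measure(weights, l1, l2):
--     sum_l1 = sum(weights[i] for i in l1)
--     sum_l2 = sum(weights[i] for i in l2)
--
--     if sum_l1 > sum_l2:
--         return -1  # l1 is heavier
--     elif sum_l1 < sum_l2:
--         return 1   # l2 is heavier
--     else:
--         return 0   # Equal weights (should not happen in this problem)
--
-- def find_heavy(weights, indices):
--     # Base case: If there's only one element left, return its index
--     if len(indices) == 1:
--         return indices[0]  # Return the index of the heavier box
--
--     # Split the indices into two halves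
--     mid = len(indices) // 2
--     left_half = indices[:mid]
--     right_half = indices[mid:]
--
--     # Compare the two halves using Measure function
--     result = Measure(weights, left_half, right_half)
--
--     # Recursively search in the heavier half
--     if result == -1:  # Left side is heavier
--         return find_heavy(weights, left_half)
--     else:  # Right side is heavier
--         return find_heavy(weights, right_half)
-- ===== SOURCE B (Python) =====
-- def find_heavy(weights, indices):
--     lo, hi = 0, len(indices)
--     while hi - lo > 1:
--         mid = lo + (hi - lo) // 2
--         left = sum(weights[i] for i in indices[lo:mid])
--         right = sum(weights[i] for i in indices[mid:hi])
--         if left > right: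
--             hi = mid
--         else:
--             lo = mid
--     return indices[lo]
-- ===== Notes on version B (the rewrite author's own statement) =====
-- stated objective: alternative
-- what changed: Replaced the recursive halving on freshly-built index sublists (and the Measure helper) with an iterative lo/hi window loop over the original indices list, comparing inline half-sums; same tie rule (go left only when strictly heavier).
import Mathlib
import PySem

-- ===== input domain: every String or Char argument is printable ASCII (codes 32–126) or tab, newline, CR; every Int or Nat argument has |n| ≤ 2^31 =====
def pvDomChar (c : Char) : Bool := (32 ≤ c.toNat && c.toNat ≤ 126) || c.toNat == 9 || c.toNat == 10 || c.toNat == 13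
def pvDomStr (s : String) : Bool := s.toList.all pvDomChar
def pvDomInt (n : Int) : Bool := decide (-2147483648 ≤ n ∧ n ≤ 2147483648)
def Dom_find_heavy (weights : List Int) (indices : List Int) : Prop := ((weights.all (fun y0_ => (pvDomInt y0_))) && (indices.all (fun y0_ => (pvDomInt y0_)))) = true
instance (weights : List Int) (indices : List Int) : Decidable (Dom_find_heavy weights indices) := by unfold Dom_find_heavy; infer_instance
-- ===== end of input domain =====

-- B is an iterative lo/hi-window reformulation of A's recursive half-weighing (same return value on Pre_).

-- ===== PORT A =====
-- sum(weights[i] for i in l): out-of-range i (IndexError) is excluded by Pre_; getD 0 is never used there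
def pvSumIdx (weights l : List Int) : Int :=
  (l.map (fun i => (PySem.List.pyGet? weights i).getD 0)).sum

def pvMeasure (weights l1 l2 : List Int) : Int :=
  let sum_l1 := pvSumIdx weights l1
  let sum_l2 := pvSumIdx weights l2
  if sum_l1 > sum_l2 then -1
  else if sum_l1 < sum_l2 then 1
  else 0

-- A's recursion, with fuel making it total: on indices = [] A never terminates (excluded by Pre_);
-- fuel = initial length suffices since each recursive call strictly shrinks the list when length ≥ 2.
def pvFindHeavyA (weights : List Int) : Nat → List Int → Int
  | 0, indices =>
    if indices.length = 1 then (PySem.List.pyGet? indices 0).getD 0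
    else 0  -- out of fuel: unreachable under Pre_
  | fuel + 1, indices =>
    if indices.length = 1 then (PySem.List.pyGet? indices 0).getD 0
    else
        let mid := indices.length / 2          -- len(indices) // 2 (nonnegative, Nat division exact)
        let left_half := indices.take mid      -- indices[:mid]
        let right_half := indices.drop mid     -- indices[mid:]
        let result := pvMeasure weights left_half right_half
        if result = -1 then pvFindHeavyA weights fuel left_half
        else pvFindHeavyA weights fuel right_half

def find_heavy (weights : List Int) (indices : List Int) : Int :=
  pvFindHeavyA weights indices.length indices

-- ===== PORT B =====
-- Source B's while loop as fuel recursion on the (lo, hi) window; lo, hi are nonnegative positions, kept as Nat.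
-- indices[lo:mid] = (indices.drop lo).take (mid - lo) for 0 ≤ lo ≤ mid (exact slice on nonneg bounds).
def pvFindHeavyB (weights indices : List Int) : Nat → Nat → Nat → Int
  | 0, lo, hi =>
    if hi - lo ≤ 1 then (PySem.List.pyGet? indices (lo : Int)).getD 0   -- return indices[lo]
    else 0  -- out of fuel: unreachable, the window shrinks every pass
  | fuel + 1, lo, hi =>
    if hi - lo ≤ 1 then (PySem.List.pyGet? indices (lo : Int)).getD 0   -- return indices[lo]
    else
        let mid := lo + (hi - lo) / 2
        let left := pvSumIdx weights ((indices.drop lo).take (mid - lo))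
        let right := pvSumIdx weights ((indices.drop mid).take (hi - mid))
        if left > right then pvFindHeavyB weights indices fuel lo mid
        else pvFindHeavyB weights indices fuel mid hi

def find_heavy_alt (weights : List Int) (indices : List Int) : Int :=
  pvFindHeavyB weights indices indices.length 0 indices.length

-- ===== PRECONDITION & SPEC =====
-- Pre_ excludes: empty indices (A recurses forever → RecursionError; B raises IndexError) and,
-- when two or more indices remain (so Measure actually subscripts weights), any index outside
-- Python's valid range for weights (A raises IndexError in Measure; so does B). A single index is
-- returned without touching weights, so no range condition is needed then.
def Pre_find_heavy (weights : List Int) (indices : List Int) : Prop :=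
  indices ≠ [] ∧ (indices.length = 1 ∨ ∀ i ∈ indices, PySem.Raise.InRange weights.length i)
instance (weights : List Int) (indices : List Int) : Decidable (Pre_find_heavy weights indices) := by unfold Pre_find_heavy; infer_instance

def pvWitness_find_heavy : List Int × List Int := ([3, 1, 7, 2], [0, 1, 2, 3])

def Spec_find_heavy (weights : List Int) (indices : List Int) (out : Int) : Prop := out = find_heavy_alt weights indices
instance (weights : List Int) (indices : List Int) (out : Int) : Decidable (Spec_find_heavy weights indices out) := by unfold Spec_find_heavy; infer_instance

-- ===== CLAIM (what is proved, stated in full; the proofs are below) =====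
def Claim_equal_find_heavy : Prop := ∀ (weights : List Int) (indices : List Int), Dom_find_heavy weights indices → Pre_find_heavy weights indices → Spec_find_heavy weights indices (find_heavy weights indices)

-- ===== LEMMAS AND PROOFS =====

-- B on window (lo, hi) computes A on the slice indices[lo:hi], with the same fuel.
lemma pvBase (weights indices : List Int) (lo hi : Nat) (hlt : lo < hi)
    (hle : hi ≤ indices.length) (h1 : hi - lo = 1) (fuel fuel' : Nat) :
    pvFindHeavyB weights indices fuel lo hi
      = pvFindHeavyA weights fuel' ((indices.drop lo).take (hi - lo)) := by
  have hlo : lo < indices.length := by omega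
  have hlen : ((indices.drop lo).take (hi - lo)).length = 1 := by
    simp [List.length_take, List.length_drop]; omega
  cases fuel <;> cases fuel' <;>
    (simp only [pvFindHeavyB, pvFindHeavyA]
     rw [if_pos (show hi - lo ≤ 1 by omega), if_pos hlen]
     rw [PySem.List.pyGet?_natCast, PySem.List.pyGet?_zero]
     rw [List.getElem?_eq_getElem hlo, List.getElem?_eq_getElem (show 0 < _ by rw [hlen]; omega)]
     simp [List.getElem_take, List.getElem_drop])

lemma pvB_eq_A (weights indices : List Int) :
    ∀ fuel lo hi, lo < hi → hi ≤ indices.length →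
      pvFindHeavyB weights indices fuel lo hi
        = pvFindHeavyA weights fuel ((indices.drop lo).take (hi - lo)) := by
  intro fuel
  induction fuel with
  | zero =>
    intro lo hi hlt hle
    by_cases h1 : hi - lo = 1
    · exact pvBase weights indices lo hi hlt hle h1 0 0
    · have hlen : ((indices.drop lo).take (hi - lo)).length = hi - lo := by
        simp [List.length_take, List.length_drop]; omega
      simp only [pvFindHeavyB, pvFindHeavyA]
      rw [if_neg (show ¬ hi - lo ≤ 1 by omega),
        if_neg (show ¬ ((indices.drop lo).take (hi - lo)).length = 1 by rw [hlen]; omega)]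
  | succ fuel ih =>
    intro lo hi hlt hle
    by_cases h1 : hi - lo = 1
    · exact pvBase weights indices lo hi hlt hle h1 (fuel + 1) (fuel + 1)
    · have h2 : 2 ≤ hi - lo := by omega
      have hlen : ((indices.drop lo).take (hi - lo)).length = hi - lo := by
        simp [List.length_take, List.length_drop]; omega
      -- the two sublists A builds are slices of the original list
      have hL : ((indices.drop lo).take (hi - lo)).take ((hi - lo) / 2)
          = (indices.drop lo).take (lo + (hi - lo) / 2 - lo) := by
        rw [List.take_take]; congr 1; omega
      have hR : ((indices.drop lo).take (hi - lo)).drop ((hi - lo) / 2)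
          = (indices.drop (lo + (hi - lo) / 2)).take (hi - (lo + (hi - lo) / 2)) := by
        rw [List.drop_take, List.drop_drop,
          show hi - lo - (hi - lo) / 2 = hi - (lo + (hi - lo) / 2) by omega]
      simp only [pvFindHeavyB, pvFindHeavyA, pvMeasure]
      rw [if_neg (show ¬ hi - lo ≤ 1 by omega),
        if_neg (show ¬ ((indices.drop lo).take (hi - lo)).length = 1 by rw [hlen]; omega),
        hlen, hL, hR]
      split_ifs with hgt hres hres <;>
        first
          | exact ih lo (lo + (hi - lo) / 2) (by omega) (by omega)
          | exact ih (lo + (hi - lo) / 2) hi (by omega) hle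
          | simp_all

-- ===== VERDICT (by name: the statement is the Claim_ definition above) =====
theorem find_heavy_spec : Claim_equal_find_heavy := by
  intro weights indices _ hpre
  unfold Spec_find_heavy find_heavy find_heavy_alt
  have hne : 0 < indices.length := List.length_pos_of_ne_nil hpre.1
  rw [pvB_eq_A weights indices indices.length 0 indices.length hne le_rfl]
  simp
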